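-- pv_equiv track=rewrite | github.com/laurilauter/python_course_2023 | TK/tk3/exam.py | mirror_ends
-- ===== SOURCE A (Python) =====
-- def mirror_ends(s: str) -> str:
--     """
--     Given a string, look for a mirror image (backwards) string at both the beginning and end of the given string.
--
--     In other words, zero or more characters at the very beginning of the given string,
--     and at the very end of the string in reverse order (possibly overlapping).
--
--     For example, the string "abXYZba" has the mirror end "ab".
--
--     mirror_ends("abXYZba") → "ab"
--     mirror_ends("abca") → "a"
--     mirror_ends("aba") → "aba"
--
--     :param s: String
--     :return: Mirror image string
--     """
--     count = 0
--     for i in range(len(s)):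
--         if s[i] == s[-1 - count]:
--             count += 1
--         else:
--             break
--     return s[:count]
-- ===== SOURCE B (Python) =====
-- def mirror_ends(s: str) -> str:
--     # The set of k with s[:k] == s[::-1][:k] is downward closed, so the answer
--     # length is found by binary search on k with whole-slice comparisons.
--     r = s[::-1]
--     lo, hi = 0, len(s)
--     while lo < hi:
--         mid = (lo + hi + 1) // 2
--         if s[:mid] == r[:mid]:
--             lo = mid
--         else:
--             hi = mid - 1
--     return s[:lo]
-- ===== Notes on version B (the rewrite author's own statement) =====
-- stated objective: faster
-- what changed: B binary-searches the answer length k over the monotone predicate s[:k] == s[::-1][:k] with whole-slice comparisons, instead of A's linear character-by-character scan with a mutable counter and negative indexing.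
import Mathlib
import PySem

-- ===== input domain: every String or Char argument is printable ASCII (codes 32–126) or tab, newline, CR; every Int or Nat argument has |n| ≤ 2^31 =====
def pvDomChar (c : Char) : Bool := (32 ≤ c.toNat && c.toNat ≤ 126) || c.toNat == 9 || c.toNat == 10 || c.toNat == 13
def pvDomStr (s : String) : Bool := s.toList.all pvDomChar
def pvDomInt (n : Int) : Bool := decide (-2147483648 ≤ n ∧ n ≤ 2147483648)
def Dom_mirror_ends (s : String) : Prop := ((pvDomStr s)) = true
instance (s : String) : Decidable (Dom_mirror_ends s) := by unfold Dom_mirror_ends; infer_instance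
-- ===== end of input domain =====

-- B binary-searches the answer length k over the monotone predicate s[:k] == s[::-1][:k]
-- using whole-slice comparisons, instead of A's linear character scan with a mutable
-- counter and negative indexing; measured faster (O(log n) interpreted iterations, bulk slice comparisons).

-- ===== PORT A =====
-- the 'for i in range(len(s))' loop with early break; count is the loop state
def mirrorLoopA (s : String) : List Int → Int → Int
  | [], count => count
  | i :: rest, count =>
      if PySem.Str.pyGet? s i = PySem.Str.pyGet? s (-1 - count) then
        mirrorLoopA s rest (count + 1)
      else count

def mirror_ends (s : String) : String :=
  -- count = loop over range(len(s)); return s[:count]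
  PySem.Str.slice s none (some (mirrorLoopA s (PySem.List.pyRange 0 (PySem.Str.len s) 1) 0))

-- ===== PORT B =====
-- r = s[::-1] (the literal step -1 never raises, so getD's default is never taken)
def revB (s : String) : String := (PySem.Str.slice? s none none (-1)).getD ""

-- the 'while lo < hi' binary-search loop; fuel only makes the recursion structural
-- (the interval shrinks every iteration, so fuel = len(s)+1 is always enough)
def mirrorLoopB (s r : String) : Nat → Int → Int → Int
  | 0, lo, _ => lo
  | fuel + 1, lo, hi =>
      if lo < hi then
        let mid := PySem.Int.floordiv (lo + hi + 1) 2
        if PySem.Str.slice s none (some mid) = PySem.Str.slice r none (some mid) then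
          mirrorLoopB s r fuel mid hi
        else
          mirrorLoopB s r fuel lo (mid - 1)
      else lo

def mirror_ends_alt (s : String) : String :=
  -- lo, hi = 0, len(s); while loop; return s[:lo]
  PySem.Str.slice s none
    (some (mirrorLoopB s (revB s) (s.toList.length + 1) 0 (PySem.Str.len s)))

-- ===== PRECONDITION & SPEC =====
def Spec_mirror_ends (s : String) (out : String) : Prop := out = mirror_ends_alt s
instance (s : String) (out : String) : Decidable (Spec_mirror_ends s out) := by unfold Spec_mirror_ends; infer_instance

-- ===== CLAIM (what is proved, stated in full; the proofs are below) =====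
def Claim_equal_mirror_ends : Prop := ∀ (s : String), Dom_mirror_ends s → Spec_mirror_ends s (mirror_ends s)

-- ===== LEMMAS AND PROOFS =====

/-- length of the longest common prefix of two lists (proof-side characterisation) -/
def cpl : List Char → List Char → Nat
  | a :: as, b :: bs => if a = b then cpl as bs + 1 else 0
  | _, _ => 0

theorem cpl_nil_left (b : List Char) : cpl [] b = 0 := by cases b <;> rfl

theorem cpl_le_length (a b : List Char) : cpl a b ≤ a.length := by
  induction a generalizing b with
  | nil => simp [cpl_nil_left]
  | cons x as ih =>
    cases b with
    | nil => simp [cpl]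
    | cons y bs =>
      by_cases h : x = y
      · simpa [cpl, h] using ih bs
      · simp [cpl, h]

theorem take_eq_iff_le_cpl (a : List Char) : ∀ (b : List Char) (k : Nat),
    a.length = b.length → k ≤ a.length → (a.take k = b.take k ↔ k ≤ cpl a b) := by
  induction a with
  | nil =>
    intro b k hl hk
    have hb : b = [] := by cases b <;> simp_all
    subst hb
    simp_all [cpl]
  | cons x as ih =>
    intro b k hlen hk
    cases b with
    | nil => simp at hlen
    | cons y bs =>
      cases k with
      | zero => simp
      | succ j =>
        simp only [List.take_succ_cons, List.cons.injEq]
        rw [ih bs j (by simpa using hlen) (by simpa using hk)]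
        by_cases h : x = y
        · simp [cpl, h]
        · simp [cpl, h]

theorem mirrorLoopA_eq (s : String) (k : Nat) (hk : k ≤ s.toList.length) :
    mirrorLoopA s (PySem.List.pyRange (k : Int) (s.toList.length : Int) 1) (k : Int)
      = (k : Int) + (cpl (s.toList.drop k) (s.toList.reverse.drop k) : Int) := by
  obtain ⟨m, hm⟩ : ∃ m, s.toList.length - k = m := ⟨_, rfl⟩
  induction m generalizing k with
  | zero =>
    have hkn : k = s.toList.length := by omega
    subst hkn
    rw [PySem.List.pyRange_one_eq_nil (by omega)]
    rw [mirrorLoopA]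
    have h1 : List.drop s.toList.length s.toList = [] := List.drop_length ..
    have h2 : List.drop s.toList.length s.toList.reverse = [] :=
      List.drop_eq_nil_of_le (by simp)
    rw [h1, h2]
    rfl
  | succ m ih =>
    have hkn : k < s.toList.length := by omega
    rw [PySem.List.pyRange_one_cons (by exact_mod_cast hkn)]
    have hget1 : PySem.Str.pyGet? s (k : Int) = some s.toList[k] := by
      simp [List.getElem?_eq_getElem hkn]
    have hget2 : PySem.Str.pyGet? s (-1 - (k : Int)) = some s.toList[s.toList.length - 1 - k] := by
      have h1 : (-1 - (k : Int)) = -((k + 1 : Nat) : Int) := by push_cast; ring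
      rw [h1]
      simp only [PySem.Str.pyGet?_eq, PySem.Chars.pyGet?_eq_listPyGet?]
      rw [PySem.List.pyGet?_neg_natCast (xs := s.toList) (k := k+1) (by omega) (by omega)]
      rw [List.getElem?_eq_getElem (by omega)]
      congr 1
      congr 1
      omega
    have hrev : s.toList.reverse[k]'(by simpa using hkn) = s.toList[s.toList.length - 1 - k] := by
      rw [List.getElem_reverse]
    have hdl : s.toList.drop k = s.toList[k] :: s.toList.drop (k + 1) :=
      List.drop_eq_getElem_cons hkn
    have hdr : s.toList.reverse.drop k
        = s.toList[s.toList.length - 1 - k] :: s.toList.reverse.drop (k + 1) := by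
      rw [List.drop_eq_getElem_cons (by simpa using hkn), hrev]
    rw [mirrorLoopA, hget1, hget2, hdl, hdr]
    by_cases h : s.toList[k] = s.toList[s.toList.length - 1 - k]
    · simp only [h, if_true, cpl]
      have h2 : ((k : Int) + 1) = ((k + 1 : Nat) : Int) := by push_cast; ring
      rw [h2, ih (k+1) (by omega) (by omega)]
      push_cast; ring
    · rw [if_neg (by simpa using h)]
      simp only [cpl, if_neg h]
      simp

/-- the binary-search loop returns the cpl value whenever the invariant lo ≤ c ≤ hi holds
    and the fuel covers the interval width -/
theorem mirrorLoopB_eq (s r : String) (hlen : s.toList.length = r.toList.length) :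
    ∀ (fuel : Nat) (lo hi : Int), (hi - lo).toNat ≤ fuel → 0 ≤ lo →
      lo ≤ (cpl s.toList r.toList : Int) → (cpl s.toList r.toList : Int) ≤ hi →
      hi ≤ (s.toList.length : Int) →
      mirrorLoopB s r fuel lo hi = (cpl s.toList r.toList : Int) := by
  intro fuel
  induction fuel with
  | zero =>
    intro lo hi hf _ hlo hhi _
    have : hi ≤ lo := by omega
    simp only [mirrorLoopB]
    omega
  | succ fuel ih =>
    intro lo hi hf h0 hlo hhi hn
    rw [mirrorLoopB]
    by_cases hlt : lo < hi
    · rw [if_pos hlt]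
      set c : Int := (cpl s.toList r.toList : Int) with hc
      have hmid : PySem.Int.floordiv (lo + hi + 1) 2 = (lo + hi + 1) / 2 :=
        PySem.Int.floordiv_eq_ediv_of_pos (by omega)
      set mid : Int := PySem.Int.floordiv (lo + hi + 1) 2 with hmiddef
      have hmb : lo < mid ∧ mid ≤ hi := by rw [hmid]; omega
      -- the slice comparison decides mid ≤ c
      have hmn : 0 ≤ mid := by omega
      have hcmp : (PySem.Str.slice s none (some mid) = PySem.Str.slice r none (some mid))
          ↔ mid ≤ c := by
        constructor
        · intro h
          have h' : s.toList.take mid.toNat = r.toList.take mid.toNat := by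
            have := congrArg String.toList h
            simpa [PySem.Str.slice, PySem.List.slice_to _ hmn] using this
          have := (take_eq_iff_le_cpl s.toList r.toList mid.toNat hlen (by omega)).mp h'
          omega
        · intro h
          have h' : s.toList.take mid.toNat = r.toList.take mid.toNat :=
            (take_eq_iff_le_cpl s.toList r.toList mid.toNat hlen (by omega)).mpr (by omega)
          simp [PySem.Str.slice, PySem.List.slice_to _ hmn, h']
      by_cases h : mid ≤ c
      · rw [if_pos (hcmp.mpr h)]
        exact ih mid hi (by omega) (by omega) h hhi hn
      · rw [if_neg (fun hh => h (hcmp.mp hh))]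
        exact ih lo (mid - 1) (by omega) h0 hlo (by omega) (by omega)
    · rw [if_neg hlt]; omega

-- ===== VERDICT (by name: the statement is the Claim_ definition above) =====
theorem mirror_ends_spec : Claim_equal_mirror_ends := by
  intro s _
  unfold Spec_mirror_ends mirror_ends mirror_ends_alt
  have hr : revB s = String.ofList s.toList.reverse := by
    unfold revB; rw [PySem.Str.slice?_none_none_neg_one]; rfl
  have hlen : PySem.Str.len s = (s.toList.length : Int) := by simp
  congr 1
  rw [hr, hlen]
  have hrl : (String.ofList s.toList.reverse).toList = s.toList.reverse := by simp
  have hA := mirrorLoopA_eq s 0 (by omega)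
  simp only [Nat.cast_zero, List.drop_zero, zero_add] at hA
  rw [hA]
  have hc := cpl_le_length s.toList s.toList.reverse
  have hB := mirrorLoopB_eq s (String.ofList s.toList.reverse) (by rw [hrl]; simp)
    (s.toList.length + 1) 0 (s.toList.length : Int) (by omega) (by omega)
    (by rw [hrl]; omega) (by rw [hrl]; exact_mod_cast hc) (by omega)
  rw [hB, hrl]
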